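-- pv_equiv track=rewrite | github.com/ten-jampa/MIT-6.101-programming | snekoban/lab.py | make_new_game
-- ===== SOURCE A (Python) =====
-- def make_new_game(level_description):
--     """
--     Given a description of a game state, create and return a game
--     representation of your choice.
--
--     The given description is a list of lists of lists of strs, representing the
--     locations of the objects on the board (as described in the lab writeup).
--
--     [
--         [[], ['wall'], ['computer']],
--         [['target', 'player'], ['computer'], ['target']],
--     ]
--
--     This function creates a tuple of the player position, the frozen set of positions
--     of the computers, the frozen set of positions of the walls, and the frozen
--     set of positions of the walls, and the dimensions of the level description.
--
--     """
--     player = None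
--     computers = set()
--     targets = set()
--     walls = set()
--     # let's recover the dimensions to retrieve the level_description
--     dim = (len(level_description), len(level_description[0]))
--     for r, row in enumerate(level_description):
--         for c, states in enumerate(row):
--             if not states:  # i.e it's empty space
--                 continue
--             for state in states:
--                 if state == "player":
--                     player = (r, c)
--                 elif state == "computer":
--                     computers.add((r, c))
--                 elif state == "target":
--                     targets.add((r, c))
--                 elif state == "wall":
--                     walls.add((r, c))
--     return (player, frozenset(computers), frozenset(targets), frozenset(walls), dim)
-- ===== SOURCE B (Python) =====
-- def make_new_game(level_description):
--     dim = (len(level_description), len(level_description[0]))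
--     cells = [(r, c, states)
--              for r, row in enumerate(level_description)
--              for c, states in enumerate(row)]
--     players = [(r, c) for r, c, states in cells if 'player' in states]
--     player = players[-1] if players else None
--     computers = frozenset((r, c) for r, c, states in cells if 'computer' in states)
--     targets = frozenset((r, c) for r, c, states in cells if 'target' in states)
--     walls = frozenset((r, c) for r, c, states in cells if 'wall' in states)
--     return (player, computers, targets, walls, dim)
-- ===== Notes on version B (the rewrite author's own statement) =====
-- stated objective: idiomatic
-- what changed: Replaced the single combined dispatch loop (nested enumerate with a per-string if/elif chain mutating four accumulators) by a flattened cell list plus one independent comprehension per object kind, with the player taken as the last row-major match.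
import Mathlib
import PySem

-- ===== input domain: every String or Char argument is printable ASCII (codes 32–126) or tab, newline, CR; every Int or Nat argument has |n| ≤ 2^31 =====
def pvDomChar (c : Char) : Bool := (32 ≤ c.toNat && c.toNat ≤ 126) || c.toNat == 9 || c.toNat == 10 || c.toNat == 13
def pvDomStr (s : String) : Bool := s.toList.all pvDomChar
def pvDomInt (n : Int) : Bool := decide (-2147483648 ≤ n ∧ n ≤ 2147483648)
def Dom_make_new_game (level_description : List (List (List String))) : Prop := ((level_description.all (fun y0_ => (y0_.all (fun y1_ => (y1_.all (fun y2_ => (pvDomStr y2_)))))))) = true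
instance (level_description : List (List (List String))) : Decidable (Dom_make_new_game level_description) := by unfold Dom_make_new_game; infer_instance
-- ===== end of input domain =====

-- B replaces A's single dispatch loop over four mutable accumulators by a flattened cell
-- list and one independent pass per object kind (idiomatic decomposition; same cost).

-- ===== PORT A =====
-- literal port of A's nested enumerate loop with the if/elif dispatch chain
def make_new_game (level_description : List (List (List String))) : (Option (Int × Int)) × (List (Int × Int)) × (List (Int × Int)) × (List (Int × Int)) × (Int × Int) :=
  let dim : Int × Int := ((level_description.length : Int), ((PySem.List.pyGet? level_description 0).getD []).length)
  let st :=
    (PySem.List.enumerate level_description).foldl (fun st rr =>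
      (PySem.List.enumerate rr.2).foldl (fun st cs =>
        if cs.2 = [] then st   -- 'if not states: continue'
        else cs.2.foldl (fun st state =>
          if state = "player" then (some (rr.1, cs.1), st.2.1, st.2.2.1, st.2.2.2)
          else if state = "computer" then (st.1, PySem.Set.add st.2.1 (rr.1, cs.1), st.2.2.1, st.2.2.2)
          else if state = "target" then (st.1, st.2.1, PySem.Set.add st.2.2.1 (rr.1, cs.1), st.2.2.2)
          else if state = "wall" then (st.1, st.2.1, st.2.2.1, PySem.Set.add st.2.2.2 (rr.1, cs.1))
          else st) st) st)
      ((none : Option (Int × Int)), (PySem.Set.empty : List (Int × Int)), (PySem.Set.empty : List (Int × Int)), (PySem.Set.empty : List (Int × Int)))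
  (st.1, st.2.1, st.2.2.1, st.2.2.2, dim)

-- ===== PORT B =====
-- the flattened cell list of Source B: [(r, c, states) for r,row in enumerate(...) for c,states in enumerate(row)]
def pvCells (level_description : List (List (List String))) : List (Int × Int × List String) :=
  (PySem.List.enumerate level_description).flatMap (fun rr =>
    (PySem.List.enumerate rr.2).map (fun cs => (rr.1, cs.1, cs.2)))

def make_new_game_alt (level_description : List (List (List String))) : (Option (Int × Int)) × (List (Int × Int)) × (List (Int × Int)) × (List (Int × Int)) × (Int × Int) :=
  let dim : Int × Int := ((level_description.length : Int), ((PySem.List.pyGet? level_description 0).getD []).length)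
  let cells := pvCells level_description
  let players := cells.filterMap (fun t => if "player" ∈ t.2.2 then some (t.1, t.2.1) else none)
  let player := PySem.List.pyGet? players (-1)   -- players[-1] if players else None
  let computers := PySem.Set.ofList (cells.filterMap (fun t => if "computer" ∈ t.2.2 then some (t.1, t.2.1) else none))
  let targets := PySem.Set.ofList (cells.filterMap (fun t => if "target" ∈ t.2.2 then some (t.1, t.2.1) else none))
  let walls := PySem.Set.ofList (cells.filterMap (fun t => if "wall" ∈ t.2.2 then some (t.1, t.2.1) else none))
  (player, computers, targets, walls, dim)

-- ===== PRECONDITION & SPEC =====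
-- A (and B) raise IndexError on the empty grid (level_description[0]); nothing else is excluded.
def Pre_make_new_game (level_description : List (List (List String))) : Prop := level_description ≠ []
instance (level_description : List (List (List String))) : Decidable (Pre_make_new_game level_description) := by unfold Pre_make_new_game; infer_instance
def pvWitness_make_new_game : List (List (List String)) := [[[], ["wall"], ["computer"]], [["target", "player"], ["computer"], ["target"]]]

def Spec_make_new_game (level_description : List (List (List String))) (out : (Option (Int × Int)) × (List (Int × Int)) × (List (Int × Int)) × (List (Int × Int)) × (Int × Int)) : Prop := out = make_new_game_alt level_description
instance (level_description : List (List (List String))) (out : (Option (Int × Int)) × (List (Int × Int)) × (List (Int × Int)) × (List (Int × Int)) × (Int × Int)) : Decidable (Spec_make_new_game level_description out) := by unfold Spec_make_new_game; infer_instance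

-- ===== CLAIM (what is proved, stated in full; the proofs are below) =====
def Claim_equal_make_new_game : Prop := ∀ (level_description : List (List (List String))), Dom_make_new_game level_description → Pre_make_new_game level_description → Spec_make_new_game level_description (make_new_game level_description)

-- ===== LEMMAS AND PROOFS =====

-- the per-cell update of A, written componentwise
def pvStep (t : Int × Int × List String)
    (st : Option (Int × Int) × List (Int × Int) × List (Int × Int) × List (Int × Int)) :
    Option (Int × Int) × List (Int × Int) × List (Int × Int) × List (Int × Int) :=
  (if "player" ∈ t.2.2 then some (t.1, t.2.1) else st.1,
   if "computer" ∈ t.2.2 then PySem.Set.add st.2.1 (t.1, t.2.1) else st.2.1,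
   if "target" ∈ t.2.2 then PySem.Set.add st.2.2.1 (t.1, t.2.1) else st.2.2.1,
   if "wall" ∈ t.2.2 then PySem.Set.add st.2.2.2 (t.1, t.2.1) else st.2.2.2)

theorem pv_foldl_congr {α β : Type} (l : List α) (f g : β → α → β) (init : β)
    (h : ∀ b a, a ∈ l → f b a = g b a) : l.foldl f init = l.foldl g init := by
  induction l generalizing init with
  | nil => rfl
  | cons a l ih =>
    simp only [List.foldl_cons, h init a (List.mem_cons_self ..)]
    exact ih _ fun b x hx => h b x (List.mem_cons_of_mem _ hx)

-- A's inner fold over one cell's strings equals the componentwise formula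
theorem cell_fold (r c : Int) (states : List String)
    (st : Option (Int × Int) × List (Int × Int) × List (Int × Int) × List (Int × Int)) :
    (states.foldl (fun st state =>
      if state = "player" then (some (r, c), st.2.1, st.2.2.1, st.2.2.2)
      else if state = "computer" then (st.1, PySem.Set.add st.2.1 (r, c), st.2.2.1, st.2.2.2)
      else if state = "target" then (st.1, st.2.1, PySem.Set.add st.2.2.1 (r, c), st.2.2.2)
      else if state = "wall" then (st.1, st.2.1, st.2.2.1, PySem.Set.add st.2.2.2 (r, c))
      else st) st) = pvStep (r, c, states) st := by
  induction states generalizing st with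
  | nil => simp [pvStep]
  | cons s rest ih =>
    obtain ⟨p, cs, ts, ws⟩ := st
    simp only [List.foldl_cons]
    by_cases h1 : s = "player"
    · simp [h1, ih, pvStep]
    · by_cases h2 : s = "computer"
      · simp [h2, ih, pvStep]
      · by_cases h3 : s = "target"
        · simp [h3, ih, pvStep]
        · by_cases h4 : s = "wall"
          · simp [h4, ih, pvStep]
          · simp [h1, h2, h3, h4, ih, pvStep,
              Ne.symm h1, Ne.symm h2, Ne.symm h3, Ne.symm h4]

-- the guarded set fold over cells equals a plain Set.add fold over the filtered positions
theorem comp_fold (obj : String) (cells : List (Int × Int × List String)) (s : List (Int × Int)) :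
    cells.foldl (fun s t => if obj ∈ t.2.2 then PySem.Set.add s (t.1, t.2.1) else s) s
      = (cells.filterMap (fun t => if obj ∈ t.2.2 then some (t.1, t.2.1) else none)).foldl PySem.Set.add s := by
  induction cells generalizing s with
  | nil => rfl
  | cons a l ih => by_cases h : obj ∈ a.2.2 <;> simp [h, ih]

-- the last-wins player fold over cells, as the last filtered position
theorem player_fold (cells : List (Int × Int × List String)) (p : Option (Int × Int)) :
    cells.foldl (fun p t => if "player" ∈ t.2.2 then some (t.1, t.2.1) else p) p
      = ((cells.filterMap (fun t => if "player" ∈ t.2.2 then some (t.1, t.2.1) else none)).getLast?).or p := by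
  induction cells generalizing p with
  | nil => rfl
  | cons a l ih =>
    by_cases h : "player" ∈ a.2.2
    · simp only [List.foldl_cons, h, if_pos, List.filterMap_cons, ih]
      cases hl : (l.filterMap (fun t => if "player" ∈ t.2.2 then some (t.1, t.2.1) else none)).getLast? <;>
        simp [List.getLast?_cons, hl]
    · simp [h, ih]

-- split a fold of pvStep into its four componentwise folds
theorem foldl_pvStep (cells : List (Int × Int × List String))
    (st : Option (Int × Int) × List (Int × Int) × List (Int × Int) × List (Int × Int)) :
    cells.foldl (fun st t => pvStep t st) st =
      (cells.foldl (fun p t => if "player" ∈ t.2.2 then some (t.1, t.2.1) else p) st.1,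
       cells.foldl (fun s t => if "computer" ∈ t.2.2 then PySem.Set.add s (t.1, t.2.1) else s) st.2.1,
       cells.foldl (fun s t => if "target" ∈ t.2.2 then PySem.Set.add s (t.1, t.2.1) else s) st.2.2.1,
       cells.foldl (fun s t => if "wall" ∈ t.2.2 then PySem.Set.add s (t.1, t.2.1) else s) st.2.2.2) := by
  induction cells generalizing st with
  | nil => rfl
  | cons a l ih => rw [List.foldl_cons, ih]; rfl

-- A's nested fold is the fold of pvStep over the flattened cell list
theorem nested_eq_cells (level : List (List (List String)))
    (st : Option (Int × Int) × List (Int × Int) × List (Int × Int) × List (Int × Int)) :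
    (PySem.List.enumerate level).foldl (fun st rr =>
      (PySem.List.enumerate rr.2).foldl (fun st cs =>
        if cs.2 = [] then st
        else cs.2.foldl (fun st state =>
          if state = "player" then (some (rr.1, cs.1), st.2.1, st.2.2.1, st.2.2.2)
          else if state = "computer" then (st.1, PySem.Set.add st.2.1 (rr.1, cs.1), st.2.2.1, st.2.2.2)
          else if state = "target" then (st.1, st.2.1, PySem.Set.add st.2.2.1 (rr.1, cs.1), st.2.2.2)
          else if state = "wall" then (st.1, st.2.1, st.2.2.1, PySem.Set.add st.2.2.2 (rr.1, cs.1))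
          else st) st) st) st
    = (pvCells level).foldl (fun st t => pvStep t st) st := by
  rw [pvCells, List.foldl_flatMap]
  refine pv_foldl_congr _ _ _ _ ?_
  intro st rr _
  rw [List.foldl_map]
  refine pv_foldl_congr _ _ _ _ ?_
  intro st cs _
  by_cases h : cs.2 = []
  · simp [h, pvStep]
  · simp only [h, if_false, cell_fold]

-- ===== VERDICT (by name: the statement is the Claim_ definition above) =====
theorem make_new_game_spec : Claim_equal_make_new_game := by
  intro level _ _
  unfold Spec_make_new_game make_new_game make_new_game_alt
  simp only [nested_eq_cells, foldl_pvStep]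
  refine congrArg₂ Prod.mk ?_ (congrArg₂ Prod.mk ?_ (congrArg₂ Prod.mk ?_ (congrArg₂ Prod.mk ?_ rfl)))
  · rw [player_fold, PySem.List.pyGet?_neg_one, Option.or_none]
  · rw [comp_fold, PySem.Set.ofList_eq_foldl]; rfl
  · rw [comp_fold, PySem.Set.ofList_eq_foldl]; rfl
  · rw [comp_fold, PySem.Set.ofList_eq_foldl]; rfl
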